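-- pv_equiv track=rewrite | github.com/juns0720/baekjoon | 백준/Gold/17406. 배열 돌리기 4/배열 돌리기 4.py | cal_query
-- ===== SOURCE A (Python) =====
-- def rotate(board,sy,sx,ey,ex):
--     tmp = board[sy][ex]
--     #UP
--     for x in range(ex,sx,-1):
--         board[sy][x] = board[sy][x-1]
--
--     #LEFT
--     for y in range(sy,ey):
--         board[y][sx] = board[y+1][sx]
--     #DOWN
--     for x in range(sx,ex):
--         board[ey][x] = board[ey][x+1]
--     #RIGHT
--     for y in range(ey,sy,-1):
--         board[y][ex] = board[y-1][ex]
--     board[sy+1][ex] = tmp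
--
--     return board
--
-- def cal_query(board,sy,sx,ey,ex):
--     while sx < ex and sy < ey:
--         board = rotate(board,sy,sx,ey,ex)
--         sy += 1
--         sx += 1
--         ey -= 1
--         ex -= 1
--     return board
-- ===== SOURCE B (Python) =====
-- def cal_query(board, sy, sx, ey, ex):
--     while sx < ex and sy < ey:
--         coords = ([(sy, x) for x in range(sx, ex)]
--                   + [(y, ex) for y in range(sy, ey)]
--                   + [(ey, x) for x in range(ex, sx, -1)]
--                   + [(y, sx) for y in range(ey, sy, -1)])
--         vals = [board[y][x] for (y, x) in coords]
--         vals = vals[-1:] + vals[:-1]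
--         for (y, x), v in zip(coords, vals):
--             board[y][x] = v
--         sy += 1
--         sx += 1
--         ey -= 1
--         ex -= 1
--     return board
-- ===== Notes on version B (the rewrite author's own statement) =====
-- stated objective: alternative
-- what changed: Per ring, B builds the clockwise perimeter coordinate list once, reads all its values, rotates the value list by one and writes it back in a single pass, instead of A's four in-place shifting loops with a saved corner temporary.
-- outside the precondition, e.g. on cal_query([[6, 1, 2]], -1, 0, 0, 2): A returns [[6, 1, 2]], B returns [[1, 2, 2]]
import Mathlib
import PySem

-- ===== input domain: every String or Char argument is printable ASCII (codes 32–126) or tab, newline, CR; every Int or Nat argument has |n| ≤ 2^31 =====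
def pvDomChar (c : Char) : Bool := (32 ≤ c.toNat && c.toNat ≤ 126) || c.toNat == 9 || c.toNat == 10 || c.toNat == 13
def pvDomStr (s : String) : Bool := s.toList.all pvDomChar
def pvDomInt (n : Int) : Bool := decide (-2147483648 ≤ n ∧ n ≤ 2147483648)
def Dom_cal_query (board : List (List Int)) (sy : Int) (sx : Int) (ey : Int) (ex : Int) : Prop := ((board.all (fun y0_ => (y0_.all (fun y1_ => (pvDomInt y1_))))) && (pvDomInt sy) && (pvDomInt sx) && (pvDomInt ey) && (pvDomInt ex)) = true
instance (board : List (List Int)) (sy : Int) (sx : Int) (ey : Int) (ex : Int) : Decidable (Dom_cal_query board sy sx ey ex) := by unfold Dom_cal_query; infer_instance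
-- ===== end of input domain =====

-- B rewrites each ring rotation as: list the clockwise perimeter coordinates, read the values,
-- rotate the value list by one, write it back — instead of A's four shifting loops with a temporary.
-- Both Pythons mutate `board` in place and return the same object; the equivalence proved here is
-- about the returned value.

-- ===== PORT A =====
-- shared indexing helpers (Python list read/write semantics: negative index counts from the end;
-- an out-of-range access raises in Python — those inputs are excluded by Pre_, the helpers leave
-- the board unchanged / return a default there)
def get2 (b : List (List Int)) (y x : Int) : Int :=
  (PySem.List.pyGet? ((PySem.List.pyGet? b y).getD []) x).getD 0

def setRow (r : List Int) (i : Int) (v : Int) : List Int :=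
  let j := if i < 0 then i + r.length else i
  if 0 ≤ j ∧ j < (r.length : Int) then r.set j.toNat v else r

def set2 (b : List (List Int)) (y x : Int) (v : Int) : List (List Int) :=
  let j := if y < 0 then y + b.length else y
  if 0 ≤ j ∧ j < (b.length : Int) then b.set j.toNat (setRow (b.getD j.toNat []) x v) else b

def rotate (b : List (List Int)) (sy sx ey ex : Int) : List (List Int) :=
  let tmp := get2 b sy ex
  let b1 := (PySem.List.pyRange ex sx (-1)).foldl (fun b x => set2 b sy x (get2 b sy (x-1))) b
  let b2 := (PySem.List.pyRange sy ey 1).foldl (fun b y => set2 b y sx (get2 b (y+1) sx)) b1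
  let b3 := (PySem.List.pyRange sx ex 1).foldl (fun b x => set2 b ey x (get2 b ey (x+1))) b2
  let b4 := (PySem.List.pyRange ey sy (-1)).foldl (fun b y => set2 b y ex (get2 b (y-1) ex)) b3
  set2 b4 (sy+1) ex tmp

def cal_query (board : List (List Int)) (sy : Int) (sx : Int) (ey : Int) (ex : Int) : List (List Int) :=
  if h : sx < ex ∧ sy < ey then
    cal_query (rotate board sy sx ey ex) (sy+1) (sx+1) (ey-1) (ex-1)
  else board
termination_by (ex - sx).toNat
decreasing_by omega

-- ===== PORT B =====
def ringCoords (sy sx ey ex : Int) : List (Int × Int) :=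
  (PySem.List.pyRange sx ex 1).map (fun x => (sy, x))
  ++ (PySem.List.pyRange sy ey 1).map (fun y => (y, ex))
  ++ (PySem.List.pyRange ex sx (-1)).map (fun x => (ey, x))
  ++ (PySem.List.pyRange ey sy (-1)).map (fun y => (y, sx))

def cal_query_alt (board : List (List Int)) (sy : Int) (sx : Int) (ey : Int) (ex : Int) : List (List Int) :=
  if h : sx < ex ∧ sy < ey then
    let coords := ringCoords sy sx ey ex
    let vals := coords.map (fun c => get2 board c.1 c.2)
    let vals2 := PySem.List.slice vals (some (-1)) none ++ PySem.List.slice vals none (some (-1))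
    let board' := (coords.zip vals2).foldl (fun b cv => set2 b cv.1.1 cv.1.2 cv.2) board
    cal_query_alt board' (sy+1) (sx+1) (ey-1) (ex-1)
  else board
termination_by (ex - sx).toNat
decreasing_by omega

-- ===== PRECONDITION & SPEC =====
-- Pre_ excludes exactly the inputs on which the rotation loop touches a negative or out-of-range
-- index: an out-of-range index raises IndexError in A, and a negative index makes A return a value
-- through Python's wraparound aliasing, an accident of A's interleaved in-place writes that no
-- caller would specify (B reads the ring before writing it and returns a different value there).
def Pre_cal_query (board : List (List Int)) (sy : Int) (sx : Int) (ey : Int) (ex : Int) : Prop :=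
  sx < ex → sy < ey →
    (0 ≤ sy ∧ 0 ≤ sx ∧ ey < (board.length : Int) ∧ ∀ r ∈ board, ex < (r.length : Int))
instance (board : List (List Int)) (sy : Int) (sx : Int) (ey : Int) (ex : Int) : Decidable (Pre_cal_query board sy sx ey ex) := by unfold Pre_cal_query; infer_instance

def pvWitness_cal_query : List (List Int) × Int × Int × Int × Int :=
  ([[1, 2, 3], [4, 5, 6], [7, 8, 9]], 0, 0, 2, 2)

def Spec_cal_query (board : List (List Int)) (sy : Int) (sx : Int) (ey : Int) (ex : Int) (out : List (List Int)) : Prop := out = cal_query_alt board sy sx ey ex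
instance (board : List (List Int)) (sy : Int) (sx : Int) (ey : Int) (ex : Int) (out : List (List Int)) : Decidable (Spec_cal_query board sy sx ey ex out) := by unfold Spec_cal_query; infer_instance

-- ===== CLAIM (what is proved, stated in full; the proofs are below) =====
def Claim_equal_cal_query : Prop := ∀ (board : List (List Int)) (sy : Int) (sx : Int) (ey : Int) (ex : Int), Dom_cal_query board sy sx ey ex → Pre_cal_query board sy sx ey ex → Spec_cal_query board sy sx ey ex (cal_query board sy sx ey ex)

-- ===== LEMMAS AND PROOFS =====

theorem pvWitness_ok :
    Dom_cal_query pvWitness_cal_query.1 pvWitness_cal_query.2.1 pvWitness_cal_query.2.2.1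
      pvWitness_cal_query.2.2.2.1 pvWitness_cal_query.2.2.2.2 ∧
    Pre_cal_query pvWitness_cal_query.1 pvWitness_cal_query.2.1 pvWitness_cal_query.2.2.1
      pvWitness_cal_query.2.2.2.1 pvWitness_cal_query.2.2.2.2 := by decide


-- basic facts about the indexing helpers

theorem length_setRow (r : List Int) (i v : Int) : (setRow r i v).length = r.length := by
  unfold setRow; dsimp only
  split <;> split <;> simp

theorem shape_set_helper (b : List (List Int)) (n : Nat) (x v : Int) (h : n < b.length) :
    (b.set n (setRow (b.getD n []) x v)).map List.length = b.map List.length := by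
  rw [List.map_set]
  apply List.ext_getElem (by simp)
  intro i h1 h2
  simp only [List.getElem_set, length_setRow]
  split
  · rename_i hij; subst hij
    rw [List.getD_eq_getElem b [] h, List.getElem_map]
  · rfl

theorem shape_set2 (b : List (List Int)) (y x v : Int) :
    (set2 b y x v).map List.length = b.map List.length := by
  unfold set2; dsimp only
  split
  all_goals split
  all_goals first
    | rfl
    | (rename_i hg; exact shape_set_helper _ _ _ _ (by omega))

theorem length_of_shape {b b' : List (List Int)}
    (h : b'.map List.length = b.map List.length) : b'.length = b.length := by
  simpa using congrArg List.length h

theorem rows_of_shape {b b' : List (List Int)} {P : Nat → Prop}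
    (h : b'.map List.length = b.map List.length)
    (hb : ∀ r ∈ b, P r.length) : ∀ r ∈ b', P r.length := by
  intro r hr
  have hm : r.length ∈ b'.map List.length := List.mem_map_of_mem hr
  rw [h] at hm
  obtain ⟨r2, hr2, he⟩ := List.mem_map.1 hm
  exact he ▸ hb r2 hr2

theorem shape_foldl_set2 {α : Type} (l : List α) (row col : α → Int)
    (w : List (List Int) → α → Int) :
    ∀ b : List (List Int),
      (l.foldl (fun b t => set2 b (row t) (col t) (w b t)) b).map List.length
        = b.map List.length := by
  induction l with
  | nil => intro b; rfl
  | cons t ts ih => intro b; rw [List.foldl_cons, ih, shape_set2]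

theorem getD_row_mem (b : List (List Int)) (n : Nat) (h : n < b.length) :
    b.getD n [] ∈ b := by
  rw [List.getD_eq_getElem b [] h]; exact List.getElem_mem h

theorem get2_eq (b : List (List Int)) (y x : Int) (hy : 0 ≤ y) (hx : 0 ≤ x) :
    get2 b y x = (b.getD y.toNat []).getD x.toNat 0 := by
  unfold get2
  rw [PySem.List.pyGet?_of_nonneg b hy, PySem.List.pyGet?_of_nonneg _ hx]
  rw [List.getD_eq_getElem?_getD, List.getD_eq_getElem?_getD]

theorem set2_eq (b : List (List Int)) (y x v : Int)
    (hy : 0 ≤ y) (hx : 0 ≤ x)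
    (hyl : y < (b.length : Int)) (hxl : x < ((b.getD y.toNat []).length : Int)) :
    set2 b y x v = b.set y.toNat ((b.getD y.toNat []).set x.toNat v) := by
  unfold set2 setRow; dsimp only
  rw [if_neg (by omega : ¬ y < 0), if_pos (by constructor <;> omega)]
  rw [if_neg (by omega : ¬ x < 0), if_pos (by constructor <;> omega)]

theorem get2_set2 (b : List (List Int)) (y x v y' x' : Int)
    (hy : 0 ≤ y) (hx : 0 ≤ x) (hy' : 0 ≤ y') (hx' : 0 ≤ x')
    (hyl : y < (b.length : Int)) (hxl : x < ((b.getD y.toNat []).length : Int)) :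
    get2 (set2 b y x v) y' x' = if y' = y ∧ x' = x then v else get2 b y' x' := by
  have hxl2 : x < (((b[y.toNat]?).getD []).length : Int) := by
    rwa [← List.getD_eq_getElem?_getD]
  rw [set2_eq b y x v hy hx hyl hxl]
  rw [get2_eq _ y' x' hy' hx', get2_eq b y' x' hy' hx']
  simp only [List.getD_eq_getElem?_getD]
  rw [List.getElem?_set]
  by_cases hyy : y'.toNat = y.toNat
  · rw [if_pos hyy.symm, if_pos (by omega)]
    simp only [Option.getD_some]
    rw [List.getElem?_set]
    by_cases hxx : x'.toNat = x.toNat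
    · rw [if_pos hxx.symm, if_pos (by omega), if_pos (by constructor <;> omega)]
      rfl
    · rw [if_neg (fun he => hxx he.symm), if_neg (by omega), hyy]
  · rw [if_neg (fun he => hyy he.symm), if_neg (by omega)]


-- characterizations of A's four shifting loops (each read in a loop sees the original value)

theorem upLoop (k : Nat) :
    ∀ (b : List (List Int)) (sy lo : Int),
      0 ≤ sy → sy < (b.length : Int) → 0 ≤ lo →
      (∀ r ∈ b, lo + (k : Int) < (r.length : Int)) →
      ∀ y x : Int, 0 ≤ y → 0 ≤ x →
        get2 ((PySem.List.pyRange (lo + (k : Int)) lo (-1)).foldl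
              (fun b x => set2 b sy x (get2 b sy (x-1))) b) y x
          = if y = sy ∧ lo < x ∧ x ≤ lo + (k : Int) then get2 b sy (x-1) else get2 b y x := by
  induction k with
  | zero =>
    intro b sy lo hsy hsyl hlo hrows y x hy hx
    rw [PySem.List.pyRange_neg_one_eq_nil (by omega), List.foldl_nil, if_neg (by omega)]
  | succ k ih =>
    intro b sy lo hsy hsyl hlo hrows y x hy hx
    have he : lo + ((k+1 : Nat) : Int) = lo + (k : Int) + 1 := by push_cast; ring
    rw [he, PySem.List.pyRange_neg_one_cons (by omega)]
    rw [List.foldl_cons]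
    have he2 : lo + (k : Int) + 1 - 1 = lo + (k : Int) := by ring
    simp only [he2]
    have hrowlen : lo + (k : Int) + 1 < ((b.getD sy.toNat []).length : Int) := by
      have := hrows _ (getD_row_mem b sy.toNat (by omega))
      omega
    have hsh := shape_set2 b sy (lo + (k:Int) + 1) (get2 b sy (lo + (k:Int)))
    have hlen1 := length_of_shape hsh
    have hrows1 : ∀ r ∈ set2 b sy (lo + (k:Int) + 1) (get2 b sy (lo + (k:Int))),
        lo + (k : Int) < (r.length : Int) :=
      rows_of_shape (P := fun n => lo + (k:Int) < (n : Int)) hsh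
        (fun r hr => by have := hrows r hr; omega)
    rw [ih (set2 b sy (lo+(k:Int)+1) (get2 b sy (lo+(k:Int)))) sy lo hsy (by omega) hlo hrows1 y x hy hx]
    have hset := fun (y' x' : Int) (hy2 : 0 ≤ y') (hx2 : 0 ≤ x') =>
      get2_set2 b sy (lo+(k:Int)+1) (get2 b sy (lo+(k:Int))) y' x' hsy (by omega) hy2 hx2 hsyl hrowlen
    by_cases hc : y = sy ∧ lo < x ∧ x ≤ lo + (k:Int)
    · rw [if_pos hc, hset sy (x-1) hsy (by omega), if_neg (by omega), if_pos (by omega)]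
    · rw [if_neg hc, hset y x hy hx]
      by_cases hd : y = sy ∧ x = lo + (k:Int) + 1
      · rw [if_pos ⟨hd.1, hd.2⟩, if_pos (by omega)]
        have hx1 : x - 1 = lo + (k:Int) := by omega
        rw [hx1]
      · rw [if_neg hd, if_neg (by omega)]

theorem leftLoop (k : Nat) :
    ∀ (b : List (List Int)) (sx lo : Int),
      0 ≤ lo → lo + (k : Int) < (b.length : Int) → 0 ≤ sx →
      (∀ r ∈ b, sx < (r.length : Int)) →
      ∀ y x : Int, 0 ≤ y → 0 ≤ x →
        get2 ((PySem.List.pyRange lo (lo + (k : Int)) 1).foldl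
              (fun b y => set2 b y sx (get2 b (y+1) sx)) b) y x
          = if x = sx ∧ lo ≤ y ∧ y < lo + (k : Int) then get2 b (y+1) sx else get2 b y x := by
  induction k with
  | zero =>
    intro b sx lo hlo hlol hsx hrows y x hy hx
    rw [PySem.List.pyRange_one_eq_nil (by omega), List.foldl_nil, if_neg (by omega)]
  | succ k ih =>
    intro b sx lo hlo hlol hsx hrows y x hy hx
    have he : lo + ((k+1 : Nat) : Int) = (lo + 1) + (k : Int) := by push_cast; ring
    rw [he, PySem.List.pyRange_one_cons (by omega), List.foldl_cons]
    have hrowlen : sx < ((b.getD lo.toNat []).length : Int) :=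
      hrows _ (getD_row_mem b lo.toNat (by omega))
    have hsh := shape_set2 b lo sx (get2 b (lo+1) sx)
    have hlen1 := length_of_shape hsh
    have hrows1 : ∀ r ∈ set2 b lo sx (get2 b (lo+1) sx), sx < (r.length : Int) :=
      rows_of_shape (P := fun n => sx < (n : Int)) hsh hrows
    rw [ih (set2 b lo sx (get2 b (lo+1) sx)) sx (lo+1) (by omega) (by omega) hsx hrows1 y x hy hx]
    have hset := fun (y' x' : Int) (hy2 : 0 ≤ y') (hx2 : 0 ≤ x') =>
      get2_set2 b lo sx (get2 b (lo+1) sx) y' x' hlo hsx hy2 hx2 (by omega) hrowlen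
    by_cases hc : x = sx ∧ lo + 1 ≤ y ∧ y < lo + 1 + (k:Int)
    · rw [if_pos hc, hset (y+1) sx (by omega) hsx, if_neg (by omega), if_pos (by omega)]
    · rw [if_neg hc, hset y x hy hx]
      by_cases hd : y = lo ∧ x = sx
      · rw [if_pos hd, if_pos (by omega)]
        have hy1 : y + 1 = lo + 1 := by omega
        rw [hy1]
      · rw [if_neg hd, if_neg (by omega)]

theorem downLoop (k : Nat) :
    ∀ (b : List (List Int)) (ey lo : Int),
      0 ≤ ey → ey < (b.length : Int) → 0 ≤ lo →
      (∀ r ∈ b, lo + (k : Int) < (r.length : Int)) →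
      ∀ y x : Int, 0 ≤ y → 0 ≤ x →
        get2 ((PySem.List.pyRange lo (lo + (k : Int)) 1).foldl
              (fun b x => set2 b ey x (get2 b ey (x+1))) b) y x
          = if y = ey ∧ lo ≤ x ∧ x < lo + (k : Int) then get2 b ey (x+1) else get2 b y x := by
  induction k with
  | zero =>
    intro b ey lo hey heyl hlo hrows y x hy hx
    rw [PySem.List.pyRange_one_eq_nil (by omega), List.foldl_nil, if_neg (by omega)]
  | succ k ih =>
    intro b ey lo hey heyl hlo hrows y x hy hx
    have he : lo + ((k+1 : Nat) : Int) = (lo + 1) + (k : Int) := by push_cast; ring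
    rw [he, PySem.List.pyRange_one_cons (by omega), List.foldl_cons]
    have hrowlen : lo < ((b.getD ey.toNat []).length : Int) := by
      have := hrows _ (getD_row_mem b ey.toNat (by omega))
      omega
    have hsh := shape_set2 b ey lo (get2 b ey (lo+1))
    have hlen1 := length_of_shape hsh
    have hrows1' : ∀ r ∈ set2 b ey lo (get2 b ey (lo+1)), (lo + 1) + (k:Int) < (r.length : Int) := by
      intro r hr
      have := rows_of_shape (P := fun n => lo + ((k+1:Nat):Int) < (n : Int)) hsh hrows r hr
      omega
    rw [ih (set2 b ey lo (get2 b ey (lo+1))) ey (lo+1) hey (by omega) (by omega) hrows1' y x hy hx]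
    have hset := fun (y' x' : Int) (hy2 : 0 ≤ y') (hx2 : 0 ≤ x') =>
      get2_set2 b ey lo (get2 b ey (lo+1)) y' x' hey hlo hy2 hx2 heyl hrowlen
    by_cases hc : y = ey ∧ lo + 1 ≤ x ∧ x < lo + 1 + (k:Int)
    · rw [if_pos hc, hset ey (x+1) hey (by omega), if_neg (by omega), if_pos (by omega)]
    · rw [if_neg hc, hset y x hy hx]
      by_cases hd : y = ey ∧ x = lo
      · rw [if_pos hd, if_pos (by omega)]
        have hx1 : x + 1 = lo + 1 := by omega
        rw [hx1]
      · rw [if_neg hd, if_neg (by omega)]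

theorem rightLoop (k : Nat) :
    ∀ (b : List (List Int)) (ex lo : Int),
      0 ≤ lo → lo + (k : Int) < (b.length : Int) → 0 ≤ ex →
      (∀ r ∈ b, ex < (r.length : Int)) →
      ∀ y x : Int, 0 ≤ y → 0 ≤ x →
        get2 ((PySem.List.pyRange (lo + (k : Int)) lo (-1)).foldl
              (fun b y => set2 b y ex (get2 b (y-1) ex)) b) y x
          = if x = ex ∧ lo < y ∧ y ≤ lo + (k : Int) then get2 b (y-1) ex else get2 b y x := by
  induction k with
  | zero =>
    intro b ex lo hlo hlol hex hrows y x hy hx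
    rw [PySem.List.pyRange_neg_one_eq_nil (by omega), List.foldl_nil, if_neg (by omega)]
  | succ k ih =>
    intro b ex lo hlo hlol hex hrows y x hy hx
    have he : lo + ((k+1 : Nat) : Int) = lo + (k : Int) + 1 := by push_cast; ring
    rw [he, PySem.List.pyRange_neg_one_cons (by omega)]
    rw [List.foldl_cons]
    have he2 : lo + (k : Int) + 1 - 1 = lo + (k : Int) := by ring
    simp only [he2]
    have hrowlen : ex < ((b.getD (lo+(k:Int)+1).toNat []).length : Int) :=
      hrows _ (getD_row_mem b (lo+(k:Int)+1).toNat (by omega))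
    have hsh := shape_set2 b (lo+(k:Int)+1) ex (get2 b (lo+(k:Int)) ex)
    have hlen1 := length_of_shape hsh
    have hrows1 : ∀ r ∈ set2 b (lo+(k:Int)+1) ex (get2 b (lo+(k:Int)) ex), ex < (r.length : Int) :=
      rows_of_shape (P := fun n => ex < (n : Int)) hsh hrows
    rw [ih (set2 b (lo+(k:Int)+1) ex (get2 b (lo+(k:Int)) ex)) ex lo hlo (by omega) hex hrows1 y x hy hx]
    have hset := fun (y' x' : Int) (hy2 : 0 ≤ y') (hx2 : 0 ≤ x') =>
      get2_set2 b (lo+(k:Int)+1) ex (get2 b (lo+(k:Int)) ex) y' x' (by omega) hex hy2 hx2 (by omega) hrowlen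
    by_cases hc : x = ex ∧ lo < y ∧ y ≤ lo + (k:Int)
    · rw [if_pos hc, hset (y-1) ex (by omega) hex, if_neg (by omega), if_pos (by omega)]
    · rw [if_neg hc, hset y x hy hx]
      by_cases hd : y = lo + (k:Int) + 1 ∧ x = ex
      · rw [if_pos hd, if_pos (by omega)]
        have hy1 : y - 1 = lo + (k:Int) := by omega
        rw [hy1]
      · rw [if_neg hd, if_neg (by omega)]


-- the common pointwise description of one ring rotation

def newVal (b : List (List Int)) (sy sx ey ex y x : Int) : Int :=
  if y = sy+1 ∧ x = ex then get2 b sy ex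
  else if x = ex ∧ sy < y ∧ y ≤ ey then get2 b (y-1) ex
  else if y = ey ∧ sx ≤ x ∧ x < ex then get2 b ey (x+1)
  else if x = sx ∧ sy ≤ y ∧ y < ey then get2 b (y+1) sx
  else if y = sy ∧ sx < x ∧ x ≤ ex then get2 b sy (x-1)
  else get2 b y x

theorem rotate_shape (b : List (List Int)) (sy sx ey ex : Int) :
    (rotate b sy sx ey ex).map List.length = b.map List.length := by
  unfold rotate
  exact (shape_set2 _ _ _ _).trans ((shape_foldl_set2 _ _ _ _ _).trans
    ((shape_foldl_set2 _ _ _ _ _).trans ((shape_foldl_set2 _ _ _ _ _).trans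
      (shape_foldl_set2 _ _ _ _ _))))

theorem rotate_char (b : List (List Int)) (sy sx ey ex : Int)
    (h1 : 0 ≤ sy) (h2 : sy < ey) (h3 : ey < (b.length : Int))
    (h4 : 0 ≤ sx) (h5 : sx < ex) (h6 : ∀ r ∈ b, ex < (r.length : Int)) :
    ∀ y x : Int, 0 ≤ y → 0 ≤ x →
      get2 (rotate b sy sx ey ex) y x = newVal b sy sx ey ex y x := by
  intro y x hy hx
  unfold rotate
  set B1 := (PySem.List.pyRange ex sx (-1)).foldl (fun b x => set2 b sy x (get2 b sy (x-1))) b with hB1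
  set B2 := (PySem.List.pyRange sy ey 1).foldl (fun b y => set2 b y sx (get2 b (y+1) sx)) B1 with hB2
  set B3 := (PySem.List.pyRange sx ex 1).foldl (fun b x => set2 b ey x (get2 b ey (x+1))) B2 with hB3
  set B4 := (PySem.List.pyRange ey sy (-1)).foldl (fun b y => set2 b y ex (get2 b (y-1) ex)) B3 with hB4
  have hkx : sx + ((ex - sx).toNat : Int) = ex := by omega
  have hky : sy + ((ey - sy).toNat : Int) = ey := by omega
  -- shapes
  have s1 : B1.map List.length = b.map List.length := by rw [hB1]; exact shape_foldl_set2 _ _ _ _ _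
  have s2 : B2.map List.length = b.map List.length := by
    rw [hB2]; exact (shape_foldl_set2 _ _ _ _ _).trans s1
  have s3 : B3.map List.length = b.map List.length := by
    rw [hB3]; exact (shape_foldl_set2 _ _ _ _ _).trans s2
  have s4 : B4.map List.length = b.map List.length := by
    rw [hB4]; exact (shape_foldl_set2 _ _ _ _ _).trans s3
  have l1 := length_of_shape s1
  have l2 := length_of_shape s2
  have l3 := length_of_shape s3
  have l4 := length_of_shape s4
  have r1 : ∀ r ∈ B1, ex < (r.length : Int) := rows_of_shape (P := fun n => ex < (n:Int)) s1 h6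
  have r2 : ∀ r ∈ B2, ex < (r.length : Int) := rows_of_shape (P := fun n => ex < (n:Int)) s2 h6
  have r3 : ∀ r ∈ B3, ex < (r.length : Int) := rows_of_shape (P := fun n => ex < (n:Int)) s3 h6
  -- pointwise characterizations, all relative to the original board b
  have c1 : ∀ y x : Int, 0 ≤ y → 0 ≤ x → get2 B1 y x =
      if y = sy ∧ sx < x ∧ x ≤ ex then get2 b sy (x-1) else get2 b y x := by
    intro y x hy hx
    rw [hB1, ← hkx]
    exact upLoop (ex - sx).toNat b sy sx h1 (by omega) h4 (fun r hr => by have := h6 r hr; omega) y x hy hx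
  have c2 : ∀ y x : Int, 0 ≤ y → 0 ≤ x → get2 B2 y x =
      if x = sx ∧ sy ≤ y ∧ y < ey then get2 b (y+1) sx
      else if y = sy ∧ sx < x ∧ x ≤ ex then get2 b sy (x-1)
      else get2 b y x := by
    intro y x hy hx
    have base : get2 B2 y x =
        if x = sx ∧ sy ≤ y ∧ y < ey then get2 B1 (y+1) sx else get2 B1 y x := by
      rw [hB2, ← hky]
      have := leftLoop (ey - sy).toNat B1 sx sy h1 (by omega) h4
        (rows_of_shape (P := fun n => sx < (n:Int)) s1 (fun r hr => by have := h6 r hr; omega))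
        y x hy hx
      rw [this, hky]
    rw [base]
    by_cases hc : x = sx ∧ sy ≤ y ∧ y < ey
    · rw [if_pos hc, c1 (y+1) sx (by omega) h4, if_neg (by omega), if_pos hc]
    · rw [if_neg hc, c1 y x hy hx, if_neg hc]
  have c3 : ∀ y x : Int, 0 ≤ y → 0 ≤ x → get2 B3 y x =
      if y = ey ∧ sx ≤ x ∧ x < ex then get2 b ey (x+1)
      else if x = sx ∧ sy ≤ y ∧ y < ey then get2 b (y+1) sx
      else if y = sy ∧ sx < x ∧ x ≤ ex then get2 b sy (x-1)
      else get2 b y x := by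
    intro y x hy hx
    have base : get2 B3 y x =
        if y = ey ∧ sx ≤ x ∧ x < ex then get2 B2 ey (x+1) else get2 B2 y x := by
      rw [hB3, ← hkx]
      have := downLoop (ex - sx).toNat B2 ey sx (by omega) (by omega)
        h4 (rows_of_shape (P := fun n => sx + ((ex-sx).toNat : Int) < (n:Int)) s2
          (fun r hr => by have := h6 r hr; omega)) y x hy hx
      rw [this, hkx]
    rw [base]
    by_cases hc : y = ey ∧ sx ≤ x ∧ x < ex
    · rw [if_pos hc, c2 ey (x+1) (by omega) (by omega), if_neg (by omega), if_neg (by omega),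
        if_pos hc]
    · rw [if_neg hc, c2 y x hy hx, if_neg hc]
  have c4 : ∀ y x : Int, 0 ≤ y → 0 ≤ x → get2 B4 y x =
      if x = ex ∧ sy < y ∧ y ≤ ey then
        (if y = sy + 1 then get2 b sy (ex-1) else get2 b (y-1) ex)
      else if y = ey ∧ sx ≤ x ∧ x < ex then get2 b ey (x+1)
      else if x = sx ∧ sy ≤ y ∧ y < ey then get2 b (y+1) sx
      else if y = sy ∧ sx < x ∧ x ≤ ex then get2 b sy (x-1)
      else get2 b y x := by
    intro y x hy hx
    have base : get2 B4 y x =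
        if x = ex ∧ sy < y ∧ y ≤ ey then get2 B3 (y-1) ex else get2 B3 y x := by
      rw [hB4, ← hky]
      have := rightLoop (ey - sy).toNat B3 ex sy h1 (by omega) (by omega) r3 y x hy hx
      rw [this, hky]
    rw [base]
    by_cases hc : x = ex ∧ sy < y ∧ y ≤ ey
    · rw [if_pos hc, c3 (y-1) ex (by omega) (by omega), if_neg (by omega), if_neg (by omega),
        if_pos hc]
      by_cases hd : y = sy + 1
      · rw [if_pos hd, if_pos (by omega)]
      · rw [if_neg hd, if_neg (by omega)]
    · rw [if_neg hc, c3 y x hy hx, if_neg hc]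
  -- the final corner fix-up
  have hrowlen : ex < ((B4.getD (sy+1).toNat []).length : Int) :=
    (rows_of_shape (P := fun n => ex < (n:Int)) s4 h6) _
      (getD_row_mem B4 (sy+1).toNat (by omega))
  rw [get2_set2 B4 (sy+1) ex (get2 b sy ex) y x (by omega) (by omega) hy hx (by omega) hrowlen]
  unfold newVal
  by_cases ha : y = sy + 1 ∧ x = ex
  · rw [if_pos ha, if_pos ha]
  · rw [if_neg ha, if_neg ha, c4 y x hy hx]
    by_cases hb : x = ex ∧ sy < y ∧ y ≤ ey
    · rw [if_pos hb, if_pos hb, if_neg (by omega)]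
    · rw [if_neg hb, if_neg hb]


-- B-side machinery: pairing every perimeter cell with its clockwise predecessor's value

def zp (g : Int × Int → Int) : Int × Int → List (Int × Int) → List ((Int × Int) × Int)
  | _, [] => []
  | p, c :: cs => (c, g p) :: zp g c cs

theorem zip_shift (g : Int × Int → Int) (a : Int × Int) (l : List (Int × Int)) :
    l.zip (List.map g (a :: l.dropLast)) = zp g a l := by
  induction l generalizing a with
  | nil => rfl
  | cons c cs ih =>
    cases cs with
    | nil => rfl
    | cons c2 cs2 =>
      rw [List.dropLast_cons₂, List.map_cons, List.map_cons, List.zip_cons_cons]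
      show _ = (c, g a) :: zp g c (c2 :: cs2)
      rw [← ih c, List.map_cons]

theorem getLastD_append_singleton {α : Type} (l : List α) (a d : α) :
    (l ++ [a]).getLastD d = a := by
  cases h : l ++ [a] with
  | nil => simp at h
  | cons b bs =>
    rw [← h]
    simp [List.getLastD_eq_getLast?, List.getLast?_append]

theorem zp_append (g : Int × Int → Int) (p : Int × Int) (l1 l2 : List (Int × Int)) :
    zp g p (l1 ++ l2) = zp g p l1 ++ zp g (l1.getLastD p) l2 := by
  induction l1 generalizing p with
  | nil => rfl
  | cons c cs ih =>
    rw [List.cons_append]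
    show (c, g p) :: zp g c (cs ++ l2) = ((c, g p) :: zp g c cs) ++ _
    rw [ih c, List.cons_append, List.getLastD_cons]

-- the four perimeter segments of zp, as explicit write lists

theorem zp_row_asc (g : Int × Int → Int) (r : Int) (k : Nat) :
    ∀ (a : Int) (p : Int × Int),
      zp g p ((PySem.List.pyRange a (a + (k : Int)) 1).map (fun t => (r, t)))
        = (PySem.List.pyRange a (a + (k : Int)) 1).map
            (fun t => ((r, t), if t = a then g p else g (r, t-1))) := by
  induction k with
  | zero =>
    intro a p
    rw [PySem.List.pyRange_one_eq_nil (by omega)]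
    rfl
  | succ k ih =>
    intro a p
    have he : a + ((k+1 : Nat) : Int) = (a + 1) + (k : Int) := by push_cast; ring
    rw [he, PySem.List.pyRange_one_cons (by omega), List.map_cons, List.map_cons]
    show (⟨(r, a), g p⟩ : (Int × Int) × Int) :: zp g (r, a) _ = _
    rw [ih (a+1) (r, a), if_pos rfl]
    congr 1
    apply List.map_congr_left
    intro t ht
    rw [PySem.List.mem_pyRange_one] at ht
    by_cases hd : t = a + 1
    · rw [if_pos hd, if_neg (by omega), hd]
      norm_num
    · rw [if_neg hd, if_neg (by omega)]

theorem zp_col_asc (g : Int × Int → Int) (c : Int) (k : Nat) :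
    ∀ (a : Int) (p : Int × Int),
      zp g p ((PySem.List.pyRange a (a + (k : Int)) 1).map (fun t => (t, c)))
        = (PySem.List.pyRange a (a + (k : Int)) 1).map
            (fun t => ((t, c), if t = a then g p else g (t-1, c))) := by
  induction k with
  | zero =>
    intro a p
    rw [PySem.List.pyRange_one_eq_nil (by omega)]
    rfl
  | succ k ih =>
    intro a p
    have he : a + ((k+1 : Nat) : Int) = (a + 1) + (k : Int) := by push_cast; ring
    rw [he, PySem.List.pyRange_one_cons (by omega), List.map_cons, List.map_cons]
    show (⟨(a, c), g p⟩ : (Int × Int) × Int) :: zp g (a, c) _ = _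
    rw [ih (a+1) (a, c), if_pos rfl]
    congr 1
    apply List.map_congr_left
    intro t ht
    rw [PySem.List.mem_pyRange_one] at ht
    by_cases hd : t = a + 1
    · rw [if_pos hd, if_neg (by omega), hd]
      norm_num
    · rw [if_neg hd, if_neg (by omega)]

theorem zp_row_desc (g : Int × Int → Int) (r : Int) (k : Nat) :
    ∀ (a : Int) (p : Int × Int),
      zp g p ((PySem.List.pyRange (a + (k : Int)) a (-1)).map (fun t => (r, t)))
        = (PySem.List.pyRange (a + (k : Int)) a (-1)).map
            (fun t => ((r, t), if t = a + (k : Int) then g p else g (r, t+1))) := by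
  induction k with
  | zero =>
    intro a p
    rw [PySem.List.pyRange_neg_one_eq_nil (by omega)]
    rfl
  | succ k ih =>
    intro a p
    have he : a + ((k+1 : Nat) : Int) = a + (k : Int) + 1 := by push_cast; ring
    rw [he, PySem.List.pyRange_neg_one_cons (by omega)]
    have he2 : a + (k : Int) + 1 - 1 = a + (k : Int) := by ring
    rw [he2, List.map_cons, List.map_cons]
    show (⟨(r, a + (k:Int) + 1), g p⟩ : (Int × Int) × Int) :: zp g (r, a + (k:Int) + 1) _ = _
    rw [ih a (r, a + (k:Int) + 1), if_pos rfl]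
    congr 1
    apply List.map_congr_left
    intro t ht
    rw [PySem.List.mem_pyRange_neg_one] at ht
    by_cases hd : t = a + (k : Int)
    · rw [if_pos hd, if_neg (by omega), hd]
    · rw [if_neg hd, if_neg (by omega)]

theorem zp_col_desc (g : Int × Int → Int) (c : Int) (k : Nat) :
    ∀ (a : Int) (p : Int × Int),
      zp g p ((PySem.List.pyRange (a + (k : Int)) a (-1)).map (fun t => (t, c)))
        = (PySem.List.pyRange (a + (k : Int)) a (-1)).map
            (fun t => ((t, c), if t = a + (k : Int) then g p else g (t+1, c))) := by
  induction k with
  | zero =>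
    intro a p
    rw [PySem.List.pyRange_neg_one_eq_nil (by omega)]
    rfl
  | succ k ih =>
    intro a p
    have he : a + ((k+1 : Nat) : Int) = a + (k : Int) + 1 := by push_cast; ring
    rw [he, PySem.List.pyRange_neg_one_cons (by omega)]
    have he2 : a + (k : Int) + 1 - 1 = a + (k : Int) := by ring
    rw [he2, List.map_cons, List.map_cons]
    show (⟨(a + (k:Int) + 1, c), g p⟩ : (Int × Int) × Int) :: zp g (a + (k:Int) + 1, c) _ = _
    rw [ih a (a + (k:Int) + 1, c), if_pos rfl]
    congr 1
    apply List.map_congr_left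
    intro t ht
    rw [PySem.List.mem_pyRange_neg_one] at ht
    by_cases hd : t = a + (k : Int)
    · rw [if_pos hd, if_neg (by omega), hd]
    · rw [if_neg hd, if_neg (by omega)]

-- folding a batch of writes with precomputed values

theorem foldRow (r : Int) (w : Int → Int) (l : List Int) :
    ∀ (s : List (List Int)), 0 ≤ r → r < (s.length : Int) →
      (∀ t ∈ l, 0 ≤ t) → (∀ t ∈ l, ∀ row ∈ s, t < (row.length : Int)) →
      ∀ y x : Int, 0 ≤ y → 0 ≤ x →
        get2 (l.foldl (fun s t => set2 s r t (w t)) s) y x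
          = if y = r ∧ x ∈ l then w x else get2 s y x := by
  induction l with
  | nil =>
    intro s hr hrl hnn hcol y x hy hx
    rw [List.foldl_nil, if_neg (by simp)]
  | cons t ts ih =>
    intro s hr hrl hnn hcol y x hy hx
    rw [List.foldl_cons]
    have hsh := shape_set2 s r t (w t)
    have hlen := length_of_shape hsh
    have htn : 0 ≤ t := hnn t List.mem_cons_self
    have htl : t < ((s.getD r.toNat []).length : Int) :=
      hcol t List.mem_cons_self _ (getD_row_mem s r.toNat (by omega))
    have hcol1 : ∀ u ∈ ts, ∀ row ∈ set2 s r t (w t), u < (row.length : Int) := by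
      intro u hu row hrow
      exact rows_of_shape (P := fun n => u < (n:Int)) hsh
        (fun row2 hrow2 => hcol u (List.mem_cons_of_mem _ hu) row2 hrow2) row hrow
    rw [ih (set2 s r t (w t)) hr (by omega) (fun u hu => hnn u (List.mem_cons_of_mem _ hu))
      hcol1 y x hy hx]
    have hset := get2_set2 s r t (w t) y x hr htn hy hx hrl htl
    by_cases hc : y = r ∧ x ∈ ts
    · rw [if_pos hc, if_pos ⟨hc.1, List.mem_cons_of_mem _ hc.2⟩]
    · rw [if_neg hc, hset]
      by_cases hd : y = r ∧ x = t
      · rw [if_pos hd, if_pos ⟨hd.1, by rw [hd.2]; exact List.mem_cons_self⟩, hd.2]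
      · rw [if_neg hd, if_neg (by
          rintro ⟨hyr, hmem⟩
          rcases List.mem_cons.1 hmem with he | he
          · exact hd ⟨hyr, he⟩
          · exact hc ⟨hyr, he⟩)]

theorem foldCol (c : Int) (w : Int → Int) (l : List Int) :
    ∀ (s : List (List Int)), 0 ≤ c →
      (∀ t ∈ l, 0 ≤ t) → (∀ t ∈ l, t < (s.length : Int)) →
      (∀ row ∈ s, c < (row.length : Int)) →
      ∀ y x : Int, 0 ≤ y → 0 ≤ x →
        get2 (l.foldl (fun s t => set2 s t c (w t)) s) y x
          = if x = c ∧ y ∈ l then w y else get2 s y x := by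
  induction l with
  | nil =>
    intro s hc hnn hrow hcol y x hy hx
    rw [List.foldl_nil, if_neg (by simp)]
  | cons t ts ih =>
    intro s hc hnn hrow hcol y x hy hx
    rw [List.foldl_cons]
    have hsh := shape_set2 s t c (w t)
    have hlen := length_of_shape hsh
    have htn : 0 ≤ t := hnn t List.mem_cons_self
    have htr : t < (s.length : Int) := hrow t List.mem_cons_self
    have htl : c < ((s.getD t.toNat []).length : Int) :=
      hcol _ (getD_row_mem s t.toNat (by omega))
    rw [ih (set2 s t c (w t)) hc (fun u hu => hnn u (List.mem_cons_of_mem _ hu))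
      (fun u hu => by have := hrow u (List.mem_cons_of_mem _ hu); omega)
      (rows_of_shape (P := fun n => c < (n:Int)) hsh hcol) y x hy hx]
    have hset := get2_set2 s t c (w t) y x htn hc hy hx htr htl
    by_cases hcc : x = c ∧ y ∈ ts
    · rw [if_pos hcc, if_pos ⟨hcc.1, List.mem_cons_of_mem _ hcc.2⟩]
    · rw [if_neg hcc, hset]
      by_cases hd : y = t ∧ x = c
      · rw [if_pos hd, if_pos ⟨hd.2, by rw [hd.1]; exact List.mem_cons_self⟩, hd.1]
      · rw [if_neg hd, if_neg (by
          rintro ⟨hxc, hmem⟩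
          rcases List.mem_cons.1 hmem with he | he
          · exact hd ⟨he, hxc⟩
          · exact hcc ⟨hxc, he⟩)]


theorem zip_rot (g : Int × Int → Int) (C : List (Int × Int)) (c0 : Int × Int) :
    (C ++ [c0]).zip
        (PySem.List.slice ((C ++ [c0]).map g) (some (-1)) none
          ++ PySem.List.slice ((C ++ [c0]).map g) none (some (-1)))
      = zp g c0 (C ++ [c0]) := by
  rw [PySem.List.slice_from_neg_one, PySem.List.slice_to_neg_one]
  rw [List.map_append, List.map_singleton]
  have h1 : (C.map g ++ [g c0]).length - 1 = (C.map g).length := by simp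
  rw [h1, List.drop_left, List.dropLast_concat]
  have h2 : (C ++ [c0]).dropLast = C := List.dropLast_concat
  have h3 := zip_shift g c0 (C ++ [c0])
  rw [h2] at h3
  rw [← h3, List.map_cons]
  rfl

theorem alt_char (b : List (List Int)) (sy sx ey ex : Int)
    (h1 : 0 ≤ sy) (h2 : sy < ey) (h3 : ey < (b.length : Int))
    (h4 : 0 ≤ sx) (h5 : sx < ex) (h6 : ∀ r ∈ b, ex < (r.length : Int)) :
    ∀ y x : Int, 0 ≤ y → 0 ≤ x →
      get2 (((ringCoords sy sx ey ex).zip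
          (PySem.List.slice ((ringCoords sy sx ey ex).map (fun c => get2 b c.1 c.2)) (some (-1)) none
            ++ PySem.List.slice ((ringCoords sy sx ey ex).map (fun c => get2 b c.1 c.2)) none (some (-1)))).foldl
          (fun b cv => set2 b cv.1.1 cv.1.2 cv.2) b) y x
        = newVal b sy sx ey ex y x := by
  intro y x hy hx
  have hkx : sx + (((ex - sx).toNat : Nat) : Int) = ex := by omega
  have hky : sy + (((ey - sy).toNat : Nat) : Int) = ey := by omega
  -- split the last perimeter cell (sy+1, sx) off the coordinate list
  have hs4split : PySem.List.pyRange ey sy (-1)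
      = ((PySem.List.pyRange (sy+1+1) (ey+1) 1).reverse) ++ [sy+1] := by
    rw [PySem.List.pyRange_neg_one_eq_reverse, PySem.List.pyRange_one_cons (by omega),
        List.reverse_cons]
  have hC : ringCoords sy sx ey ex
      = ((PySem.List.pyRange sx ex 1).map (fun x => (sy, x))
          ++ (PySem.List.pyRange sy ey 1).map (fun y => (y, ex))
          ++ (PySem.List.pyRange ex sx (-1)).map (fun x => (ey, x))
          ++ ((PySem.List.pyRange (sy+1+1) (ey+1) 1).reverse).map (fun y => (y, sx)))
        ++ [((sy+1 : Int), sx)] := by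
    unfold ringCoords
    rw [hs4split, List.map_append, List.map_singleton, ← List.append_assoc]
  rw [hC, zip_rot]
  rw [← hC]
  -- decompose zp over the four segments
  have z1 : zp (fun c => get2 b c.1 c.2) ((sy+1 : Int), sx)
        ((PySem.List.pyRange sx ex 1).map (fun t => ((sy : Int), t)))
      = (PySem.List.pyRange sx ex 1).map
          (fun t => (((sy : Int), t),
            if t = sx then get2 b (sy+1) sx else get2 b sy (t-1))) := by
    have h := zp_row_asc (fun c => get2 b c.1 c.2) sy (ex - sx).toNat sx ((sy+1 : Int), sx)
    rw [hkx] at h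
    exact h
  have z2 : zp (fun c => get2 b c.1 c.2) ((sy : Int), ex-1)
        ((PySem.List.pyRange sy ey 1).map (fun t => (t, ex)))
      = (PySem.List.pyRange sy ey 1).map
          (fun t => ((t, ex),
            if t = sy then get2 b sy (ex-1) else get2 b (t-1) ex)) := by
    have h := zp_col_asc (fun c => get2 b c.1 c.2) ex (ey - sy).toNat sy ((sy : Int), ex-1)
    rw [hky] at h
    exact h
  have z3 : zp (fun c => get2 b c.1 c.2) ((ey-1 : Int), ex)
        ((PySem.List.pyRange ex sx (-1)).map (fun t => ((ey : Int), t)))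
      = (PySem.List.pyRange ex sx (-1)).map
          (fun t => (((ey : Int), t),
            if t = ex then get2 b (ey-1) ex else get2 b ey (t+1))) := by
    have h := zp_row_desc (fun c => get2 b c.1 c.2) ey (ex - sx).toNat sx ((ey-1 : Int), ex)
    rw [hkx] at h
    exact h
  have z4 : zp (fun c => get2 b c.1 c.2) ((ey : Int), sx+1)
        ((PySem.List.pyRange ey sy (-1)).map (fun t => (t, sx)))
      = (PySem.List.pyRange ey sy (-1)).map
          (fun t => ((t, sx),
            if t = ey then get2 b ey (sx+1) else get2 b (t+1) sx)) := by
    have h := zp_col_desc (fun c => get2 b c.1 c.2) sx (ey - sy).toNat sy ((ey : Int), sx+1)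
    rw [hky] at h
    exact h
  have hzp : zp (fun c => get2 b c.1 c.2) ((sy+1 : Int), sx) (ringCoords sy sx ey ex)
      = ((PySem.List.pyRange sx ex 1).map
            (fun t => (((sy : Int), t),
              if t = sx then get2 b (sy+1) sx else get2 b sy (t-1))))
        ++ (((PySem.List.pyRange sy ey 1).map
            (fun t => ((t, ex),
              if t = sy then get2 b sy (ex-1) else get2 b (t-1) ex)))
        ++ (((PySem.List.pyRange ex sx (-1)).map
            (fun t => (((ey : Int), t),
              if t = ex then get2 b (ey-1) ex else get2 b ey (t+1))))
        ++ ((PySem.List.pyRange ey sy (-1)).map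
            (fun t => ((t, sx),
              if t = ey then get2 b ey (sx+1) else get2 b (t+1) sx))))) := by
    unfold ringCoords
    rw [List.append_assoc, List.append_assoc]
    rw [zp_append, zp_append, zp_append]
    -- last elements of the three leading segments
    have hl1 : PySem.List.pyRange sx ex 1 = PySem.List.pyRange sx (ex-1) 1 ++ [ex-1] := by
      have h := PySem.List.pyRange_one_succ_right (a := sx) (b := ex - 1) (by omega)
      have he : ex - 1 + 1 = ex := by ring
      rwa [he] at h
    have hl2 : PySem.List.pyRange sy ey 1 = PySem.List.pyRange sy (ey-1) 1 ++ [ey-1] := by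
      have h := PySem.List.pyRange_one_succ_right (a := sy) (b := ey - 1) (by omega)
      have he : ey - 1 + 1 = ey := by ring
      rwa [he] at h
    have hl3 : PySem.List.pyRange ex sx (-1)
        = ((PySem.List.pyRange (sx+1+1) (ex+1) 1).reverse) ++ [sx+1] := by
      rw [PySem.List.pyRange_neg_one_eq_reverse, PySem.List.pyRange_one_cons (by omega),
          List.reverse_cons]
    have hg1 : ((PySem.List.pyRange sx ex 1).map (fun x => ((sy : Int), x))).getLastD ((sy+1 : Int), sx)
        = (sy, ex-1) := by
      rw [hl1, List.map_append, List.map_singleton, getLastD_append_singleton]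
    have hg2 : ((PySem.List.pyRange sy ey 1).map (fun y => (y, ex))).getLastD ((sy : Int), ex-1)
        = (ey-1, ex) := by
      rw [hl2, List.map_append, List.map_singleton, getLastD_append_singleton]
    have hg3 : ((PySem.List.pyRange ex sx (-1)).map (fun x => ((ey : Int), x))).getLastD ((ey-1 : Int), ex)
        = (ey, sx+1) := by
      rw [hl3, List.map_append, List.map_singleton, getLastD_append_singleton]
    rw [hg1, hg2, hg3, z1, z2, z3, z4]
  rw [hzp]
  rw [List.foldl_append, List.foldl_append, List.foldl_append]
  rw [List.foldl_map, List.foldl_map, List.foldl_map, List.foldl_map]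
  dsimp only
  set L1 := PySem.List.pyRange sx ex 1 with hL1
  set L2 := PySem.List.pyRange sy ey 1 with hL2
  set L3 := PySem.List.pyRange ex sx (-1) with hL3
  set L4 := PySem.List.pyRange ey sy (-1) with hL4
  set B1 := L1.foldl (fun s t => set2 s sy t
    (if t = sx then get2 b (sy+1) sx else get2 b sy (t-1))) b with hB1
  set B2 := L2.foldl (fun s t => set2 s t ex
    (if t = sy then get2 b sy (ex-1) else get2 b (t-1) ex)) B1 with hB2
  set B3 := L3.foldl (fun s t => set2 s ey t
    (if t = ex then get2 b (ey-1) ex else get2 b ey (t+1))) B2 with hB3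
  have sh1 : B1.map List.length = b.map List.length := by
    rw [hB1]; exact shape_foldl_set2 _ _ _ _ _
  have sh2 : B2.map List.length = b.map List.length := by
    rw [hB2]; exact (shape_foldl_set2 _ _ _ _ _).trans sh1
  have sh3 : B3.map List.length = b.map List.length := by
    rw [hB3]; exact (shape_foldl_set2 _ _ _ _ _).trans sh2
  have len1 := length_of_shape sh1
  have len2 := length_of_shape sh2
  have len3 := length_of_shape sh3
  have mem1 : ∀ t : Int, t ∈ L1 ↔ sx ≤ t ∧ t < ex := fun t => PySem.List.mem_pyRange_one
  have mem2 : ∀ t : Int, t ∈ L2 ↔ sy ≤ t ∧ t < ey := fun t => PySem.List.mem_pyRange_one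
  have mem3 : ∀ t : Int, t ∈ L3 ↔ sx < t ∧ t ≤ ex := fun t => PySem.List.mem_pyRange_neg_one
  have mem4 : ∀ t : Int, t ∈ L4 ↔ sy < t ∧ t ≤ ey := fun t => PySem.List.mem_pyRange_neg_one
  have D1 : ∀ y x : Int, 0 ≤ y → 0 ≤ x →
      get2 B1 y x = if y = sy ∧ x ∈ L1
        then (if x = sx then get2 b (sy+1) sx else get2 b sy (x-1))
        else get2 b y x := by
    intro y x hy hx
    rw [hB1]
    exact foldRow sy _ L1 b h1 (by omega)
      (fun t ht => by have := (mem1 t).1 ht; omega)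
      (fun t ht row hrow => by
        have := (mem1 t).1 ht
        have := h6 row hrow
        omega)
      y x hy hx
  have D2 : ∀ y x : Int, 0 ≤ y → 0 ≤ x →
      get2 B2 y x = if x = ex ∧ y ∈ L2
        then (if y = sy then get2 b sy (ex-1) else get2 b (y-1) ex)
        else get2 B1 y x := by
    intro y x hy hx
    rw [hB2]
    exact foldCol ex _ L2 B1 (by omega)
      (fun t ht => by have := (mem2 t).1 ht; omega)
      (fun t ht => by have := (mem2 t).1 ht; omega)
      (rows_of_shape (P := fun n => ex < (n:Int)) sh1 h6)
      y x hy hx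
  have D3 : ∀ y x : Int, 0 ≤ y → 0 ≤ x →
      get2 B3 y x = if y = ey ∧ x ∈ L3
        then (if x = ex then get2 b (ey-1) ex else get2 b ey (x+1))
        else get2 B2 y x := by
    intro y x hy hx
    rw [hB3]
    exact foldRow ey _ L3 B2 (by omega) (by omega)
      (fun t ht => by have := (mem3 t).1 ht; omega)
      (fun t ht row hrow => by
        have := (mem3 t).1 ht
        have := rows_of_shape (P := fun n => ex < (n:Int)) sh2 h6 row hrow
        omega)
      y x hy hx
  have D4 : get2 (L4.foldl (fun s t => set2 s t sx
        (if t = ey then get2 b ey (sx+1) else get2 b (t+1) sx)) B3) y x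
      = if x = sx ∧ y ∈ L4
        then (if y = ey then get2 b ey (sx+1) else get2 b (y+1) sx)
        else get2 B3 y x :=
    foldCol sx _ L4 B3 h4
      (fun t ht => by have := (mem4 t).1 ht; omega)
      (fun t ht => by have := (mem4 t).1 ht; omega)
      (rows_of_shape (P := fun n => sx < (n:Int)) sh3 (fun r hr => by have := h6 r hr; omega))
      y x hy hx
  rw [D4]
  by_cases c4 : x = sx ∧ y ∈ L4
  · have hm := (mem4 y).1 c4.2
    have hc41 := c4.1
    rw [if_pos c4]
    unfold newVal
    by_cases hd : y = ey
    · rw [if_pos hd, if_neg (by omega), if_neg (by omega), if_pos (by omega), hc41]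
    · rw [if_neg hd, if_neg (by omega), if_neg (by omega), if_neg (by omega),
        if_pos (by omega)]
  · rw [if_neg c4, D3 y x hy hx]
    by_cases c3 : y = ey ∧ x ∈ L3
    · have hm := (mem3 x).1 c3.2
      have hc31 := c3.1
      rw [if_pos c3]
      unfold newVal
      by_cases hd : x = ex
      · by_cases hs : ey = sy + 1
        · rw [if_pos hd, if_pos (by omega)]
          have he : ey - 1 = sy := by omega
          rw [he]
        · rw [if_pos hd, if_neg (by omega), if_pos (by omega), hc31]
      · rw [if_neg hd, if_neg (by omega), if_neg (by omega), if_pos (by omega)]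
    · rw [if_neg c3, D2 y x hy hx]
      by_cases c2 : x = ex ∧ y ∈ L2
      · have hm := (mem2 y).1 c2.2
        have hc21 := c2.1
        rw [if_pos c2]
        unfold newVal
        by_cases hd : y = sy
        · rw [if_pos hd, if_neg (by omega), if_neg (by omega), if_neg (by omega),
            if_neg (by omega), if_pos (by omega), hc21]
        · by_cases hs : y = sy + 1
          · rw [if_neg hd, if_pos (by omega)]
            have he : y - 1 = sy := by omega
            rw [he]
          · rw [if_neg hd, if_neg (by omega), if_pos (by omega)]
      · rw [if_neg c2, D1 y x hy hx]
        by_cases c1 : y = sy ∧ x ∈ L1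
        · have hm := (mem1 x).1 c1.2
          have hc11 := c1.1
          rw [if_pos c1]
          unfold newVal
          by_cases hd : x = sx
          · rw [if_pos hd, if_neg (by omega), if_neg (by omega), if_neg (by omega),
              if_pos (by omega), hc11]
          · rw [if_neg hd, if_neg (by omega), if_neg (by omega), if_neg (by omega),
              if_neg (by omega), if_pos (by omega)]
        · rw [if_neg c1]
          unfold newVal
          have m1 := mem1 x
          have m2 := mem2 y
          have m3 := mem3 x
          have m4 := mem4 y
          rw [if_neg (by
              rintro ⟨hya, hxa⟩
              by_cases hsy1 : sy + 1 < ey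
              · exact c2 ⟨hxa, (m2).2 (by omega)⟩
              · exact c3 ⟨by omega, (m3).2 (by omega)⟩),
            if_neg (by
              rintro ⟨hxa, hya, hyb⟩
              by_cases hyy : y < ey
              · exact c2 ⟨hxa, (m2).2 (by omega)⟩
              · exact c3 ⟨by omega, (m3).2 (by omega)⟩),
            if_neg (by
              rintro ⟨hya, hxa, hxb⟩
              by_cases hxx : sx < x
              · exact c3 ⟨hya, (m3).2 (by omega)⟩
              · exact c4 ⟨by omega, (m4).2 (by omega)⟩),
            if_neg (by
              rintro ⟨hxa, hya, hyb⟩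
              by_cases hyy : sy < y
              · exact c4 ⟨hxa, (m4).2 (by omega)⟩
              · exact c1 ⟨by omega, (m1).2 (by omega)⟩),
            if_neg (by
              rintro ⟨hya, hxa, hxb⟩
              by_cases hxx : x < ex
              · exact c1 ⟨hya, (m1).2 (by omega)⟩
              · exact c2 ⟨by omega, (m2).2 (by omega)⟩)]


-- extensionality for boards via get2

theorem board_ext (b1 b2 : List (List Int))
    (hs : b1.map List.length = b2.map List.length)
    (h : ∀ y x : Int, 0 ≤ y → 0 ≤ x → get2 b1 y x = get2 b2 y x) : b1 = b2 := by
  have hlen : b1.length = b2.length := length_of_shape hs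
  apply List.ext_getElem hlen
  intro i h1 h2
  have hrl : b1[i].length = b2[i].length := by
    have e := congrArg (fun l => l[i]?) hs
    simp only [List.getElem?_map] at e
    rw [List.getElem?_eq_getElem h1, List.getElem?_eq_getElem h2] at e
    simpa using e
  apply List.ext_getElem hrl
  intro j j1 j2
  have hg := h i j (Int.natCast_nonneg i) (Int.natCast_nonneg j)
  rw [get2_eq b1 _ _ (Int.natCast_nonneg i) (Int.natCast_nonneg j),
      get2_eq b2 _ _ (Int.natCast_nonneg i) (Int.natCast_nonneg j)] at hg
  simp only [Int.toNat_natCast] at hg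
  rw [List.getD_eq_getElem b1 [] h1, List.getD_eq_getElem b2 [] h2] at hg
  rw [List.getD_eq_getElem _ 0 j1, List.getD_eq_getElem _ 0 j2] at hg
  exact hg

-- one ring of A equals one ring of B

theorem ring_eq (b : List (List Int)) (sy sx ey ex : Int)
    (h1 : 0 ≤ sy) (h2 : sy < ey) (h3 : ey < (b.length : Int))
    (h4 : 0 ≤ sx) (h5 : sx < ex) (h6 : ∀ r ∈ b, ex < (r.length : Int)) :
    rotate b sy sx ey ex
      = ((ringCoords sy sx ey ex).zip
          (PySem.List.slice ((ringCoords sy sx ey ex).map (fun c => get2 b c.1 c.2)) (some (-1)) none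
            ++ PySem.List.slice ((ringCoords sy sx ey ex).map (fun c => get2 b c.1 c.2)) none (some (-1)))).foldl
          (fun b cv => set2 b cv.1.1 cv.1.2 cv.2) b := by
  apply board_ext
  · exact (rotate_shape b sy sx ey ex).trans (shape_foldl_set2 _ _ _ _ _).symm
  · intro y x hy hx
    rw [rotate_char b sy sx ey ex h1 h2 h3 h4 h5 h6 y x hy hx,
        alt_char b sy sx ey ex h1 h2 h3 h4 h5 h6 y x hy hx]

theorem main_aux : ∀ (n : Nat) (b : List (List Int)) (sy sx ey ex : Int),
    (ex - sx).toNat ≤ n → Pre_cal_query b sy sx ey ex →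
    cal_query b sy sx ey ex = cal_query_alt b sy sx ey ex := by
  intro n
  induction n with
  | zero =>
    intro b sy sx ey ex hn hpre
    rw [cal_query, cal_query_alt, dif_neg (by rintro ⟨u, v⟩; omega),
        dif_neg (by rintro ⟨u, v⟩; omega)]
  | succ n ih =>
    intro b sy sx ey ex hn hpre
    rw [cal_query, cal_query_alt]
    by_cases hc : sx < ex ∧ sy < ey
    · rw [dif_pos hc, dif_pos hc]
      obtain ⟨p1, p2, p3, p4⟩ := hpre hc.1 hc.2
      have hr := ring_eq b sy sx ey ex p1 hc.2 p3 p2 hc.1 p4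
      dsimp only
      rw [hr]
      apply ih _ (sy+1) (sx+1) (ey-1) (ex-1) (by omega)
      intro hx' hy'
      have hsh : (((ringCoords sy sx ey ex).zip
          (PySem.List.slice ((ringCoords sy sx ey ex).map (fun c => get2 b c.1 c.2)) (some (-1)) none
            ++ PySem.List.slice ((ringCoords sy sx ey ex).map (fun c => get2 b c.1 c.2)) none (some (-1)))).foldl
          (fun b cv => set2 b cv.1.1 cv.1.2 cv.2) b).map List.length = b.map List.length :=
        shape_foldl_set2 _ _ _ _ _
      refine ⟨by omega, by omega, ?_, ?_⟩
      · have := length_of_shape hsh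
        omega
      · exact rows_of_shape (P := fun m => ex - 1 < (m : Int)) hsh
          (fun r hr2 => by have := p4 r hr2; omega)
    · rw [dif_neg hc, dif_neg hc]

-- ===== VERDICT (by name: the statement is the Claim_ definition above) =====
theorem cal_query_spec : Claim_equal_cal_query := by
  intro board sy sx ey ex hdom hpre
  unfold Spec_cal_query
  exact main_aux (ex - sx).toNat board sy sx ey ex le_rfl hpre
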